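-- pv_equiv track=rewrite | github.com/franklinwangg/SearchableEncryptionAdjustableLeakage | seal/seal_server.py | group_like_elements
-- ===== SOURCE A (Python) =====
-- def group_like_elements(D):
--     M = []  # List to store groups
--     if not D:
--         return M  # Return empty if D is empty
--
--     current_group = [D[0]]  # Start with the first element
--
--     for i in range(1, len(D)):  # Iterate through D starting from index 1
--         if D[i][1] == current_group[0][1]:  # Compare with the first element of current group
--             current_group.append(D[i])  # Add to the current group
--         else:
--             M.append(current_group)  # Store the completed group
--             current_group = [D[i]]  # Start a new group
--
--     M.append(current_group)  # Append the last group
--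
--     return M
-- ===== SOURCE B (Python) =====
-- def group_like_elements(D):
--     M = []
--     n = len(D)
--     i = 0
--     while i < n:
--         j = i + 1
--         while j < n and D[j][1] == D[i][1]:
--             j += 1
--         M.append(D[i:j])
--         i = j
--     return M
-- ===== Notes on version B (the rewrite author's own statement) =====
-- stated objective: alternative
-- what changed: Replaces A's accumulator loop (current_group grown element by element, flushed into M on key change) by a two-pointer scan that finds each run's end index and emits the slice D[i:j] directly, with no current_group state.
import Mathlib
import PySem

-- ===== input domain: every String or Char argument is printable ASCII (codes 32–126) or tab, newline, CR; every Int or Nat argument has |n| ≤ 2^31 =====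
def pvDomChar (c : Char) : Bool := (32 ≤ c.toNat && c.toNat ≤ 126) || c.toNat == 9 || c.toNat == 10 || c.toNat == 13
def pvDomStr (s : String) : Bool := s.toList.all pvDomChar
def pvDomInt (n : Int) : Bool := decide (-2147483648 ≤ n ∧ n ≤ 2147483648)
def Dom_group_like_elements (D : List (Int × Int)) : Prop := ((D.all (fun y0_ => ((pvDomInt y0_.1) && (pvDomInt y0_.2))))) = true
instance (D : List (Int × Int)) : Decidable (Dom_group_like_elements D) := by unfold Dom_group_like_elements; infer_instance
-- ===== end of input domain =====

-- B keeps no current_group accumulator: a two-pointer scan finds each run's end index and emits the slice directly (alternative decomposition, same O(n) cost).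

-- ===== PORT A =====
-- loop body of A: compare D[i][1] with current_group[0][1]; extend or flush
def stepA (st : List (List (Int × Int)) × List (Int × Int)) (d : Int × Int) :
    List (List (Int × Int)) × List (Int × Int) :=
  if d.2 == (st.2.headD (0, 0)).2 then (st.1, st.2 ++ [d]) else (st.1 ++ [st.2], [d])

def group_like_elements (D : List (Int × Int)) : List (List (Int × Int)) :=
  match D with
  | [] => []                                   -- if not D: return M (= [])
  | d0 :: _ =>
    -- for i in range(1, len(D)): … over state (M, current_group)
    let st := (PySem.List.pyRange 1 (PySem.List.len D) 1).foldl
      (fun st i => stepA st (PySem.List.pyGetD D i (0, 0))) ([], [d0])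
    st.1 ++ [st.2]                             -- M.append(current_group); return M

-- ===== PORT B =====
-- inner while: j += 1 while j < n and D[j][1] == D[i][1]
def bInner (D : List (Int × Int)) (k : Int) (j : Nat) : Nat :=
  if j < D.length ∧ (PySem.List.pyGetD D (j : Int) (0, 0)).2 == k then bInner D k (j + 1) else j
termination_by D.length - j
decreasing_by omega

theorem bInner_ge (D : List (Int × Int)) (k : Int) (j : Nat) : j ≤ bInner D k j := by
  fun_induction bInner with
  | case1 _ ih => omega
  | case2 => omega

-- outer while: slice out D[i:j], continue at i = j
def bOuter (D : List (Int × Int)) (i : Nat) : List (List (Int × Int)) :=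
  if h : i < D.length then
    let j := bInner D (PySem.List.pyGetD D (i : Int) (0, 0)).2 (i + 1)
    PySem.List.slice D (some (i : Int)) (some (j : Int)) :: bOuter D j
  else []
termination_by D.length - i
decreasing_by have := bInner_ge D (PySem.List.pyGetD D (i : Int) (0, 0)).2 (i + 1); omega

def group_like_elements_alt (D : List (Int × Int)) : List (List (Int × Int)) :=
  bOuter D 0

-- ===== PRECONDITION & SPEC =====
def Spec_group_like_elements (D : List (Int × Int)) (out : List (List (Int × Int))) : Prop := out = group_like_elements_alt D
instance (D : List (Int × Int)) (out : List (List (Int × Int))) : Decidable (Spec_group_like_elements D out) := by unfold Spec_group_like_elements; infer_instance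

-- ===== CLAIM (what is proved, stated in full; the proofs are below) =====
def Claim_equal_group_like_elements : Prop := ∀ (D : List (Int × Int)), Dom_group_like_elements D → Spec_group_like_elements D (group_like_elements D)

-- ===== LEMMAS AND PROOFS =====

-- common characterisation: maximal runs of equal second components
def pvGroups : List (Int × Int) → List (List (Int × Int))
  | [] => []
  | x :: xs =>
    (x :: xs.takeWhile (fun y => y.2 == x.2)) :: pvGroups (xs.dropWhile (fun y => y.2 == x.2))
termination_by l => l.length
decreasing_by simpa using Nat.lt_succ_of_le (List.length_dropWhile_le _ _)

theorem take_length_takeWhile (l : List (Int × Int)) (p : Int × Int → Bool) :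
    l.take (l.takeWhile p).length = l.takeWhile p := by
  induction l with
  | nil => simp
  | cons x xs ih => by_cases h : p x <;> simp [h, ih]

theorem drop_length_takeWhile (l : List (Int × Int)) (p : Int × Int → Bool) :
    l.drop (l.takeWhile p).length = l.dropWhile p := by
  induction l with
  | nil => simp
  | cons x xs ih => by_cases h : p x <;> simp [h, ih]

theorem foldA_eq (rest : List (Int × Int)) :
    ∀ (M : List (List (Int × Int))) (c : Int × Int) (cs : List (Int × Int)),
    (rest.foldl stepA (M, c :: cs)).1 ++ [(rest.foldl stepA (M, c :: cs)).2] =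
      M ++ ((c :: (cs ++ rest.takeWhile (fun y => y.2 == c.2))) ::
            pvGroups (rest.dropWhile (fun y => y.2 == c.2))) := by
  induction rest with
  | nil => intro M c cs; simp [pvGroups]
  | cons d rest' ih =>
    intro M c cs
    by_cases h : d.2 == c.2
    · have step : stepA (M, c :: cs) d = (M, c :: (cs ++ [d])) := by
        simp [stepA, h]
      simp only [List.foldl_cons, step, ih, List.takeWhile_cons, List.dropWhile_cons, h,
        if_pos, List.cons_append, List.append_assoc]
      simp
    · have step : stepA (M, c :: cs) d = (M ++ [c :: cs], d :: ([] : List (Int × Int))) := by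
        simp [stepA, h]
      simp only [List.foldl_cons, step, ih, List.takeWhile_cons, List.dropWhile_cons, h]
      simp [pvGroups, List.append_assoc]

theorem a_eq_groups (D : List (Int × Int)) : group_like_elements D = pvGroups D := by
  cases D with
  | nil => simp [group_like_elements, pvGroups]
  | cons d0 rest =>
    simp only [group_like_elements, PySem.List.len_eq]
    rw [PySem.List.foldl_pyRange_pyGetD' (d0 :: rest) (0, 0) stepA ([], [d0]) (by omega : (0:Int) ≤ 1)]
    simpa [pvGroups] using foldA_eq rest [] d0 []

theorem bInner_eq (D : List (Int × Int)) (k : Int) (j : Nat) :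
    bInner D k j = j + ((D.drop j).takeWhile (fun y => y.2 == k)).length := by
  fun_induction bInner with
  | case1 j h ih =>
    obtain ⟨hj, hp⟩ := h
    rw [PySem.List.pyGetD_natCast, List.getD_eq_getElem _ _ hj] at hp
    rw [ih, List.drop_eq_getElem_cons hj, List.takeWhile_cons, if_pos hp]
    simp; omega
  | case2 j h =>
    by_cases hj : j < D.length
    · have hp : ¬ ((PySem.List.pyGetD D (j : Int) (0, 0)).2 == k) = true := fun hp => h ⟨hj, hp⟩
      rw [PySem.List.pyGetD_natCast, List.getD_eq_getElem _ _ hj] at hp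
      rw [List.drop_eq_getElem_cons hj, List.takeWhile_cons, if_neg hp]
      simp
    · rw [List.drop_eq_nil_of_le (by omega)]; simp

theorem b_eq_groups (D : List (Int × Int)) (i : Nat) : bOuter D i = pvGroups (D.drop i) := by
  fun_induction bOuter with
  | case2 i h => rw [List.drop_eq_nil_of_le (by omega)]; simp [pvGroups]
  | case1 i h j ih =>
    have hget : PySem.List.pyGetD D (i : Int) (0, 0) = D[i] := by
      rw [PySem.List.pyGetD_natCast, List.getD_eq_getElem _ _ h]
    have hj : j = (i + 1) + ((D.drop (i + 1)).takeWhile (fun y => y.2 == D[i].2)).length := by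
      rw [show j = bInner D (PySem.List.pyGetD D (i : Int) (0, 0)).2 (i + 1) from rfl,
        bInner_eq, hget]
    have hslice : PySem.List.slice D (some (i : Int)) (some (j : Int)) =
        D[i] :: (D.drop (i + 1)).takeWhile (fun y => y.2 == D[i].2) := by
      rw [PySem.List.slice_toNat D (Int.natCast_nonneg i) (Int.natCast_nonneg j)]
      simp only [Int.toNat_natCast]
      rw [hj, show (i + 1) + ((D.drop (i + 1)).takeWhile (fun y => y.2 == D[i].2)).length - i
            = ((D.drop (i + 1)).takeWhile (fun y => y.2 == D[i].2)).length + 1 by omega,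
        List.drop_eq_getElem_cons h, List.take_succ_cons, take_length_takeWhile]
    rw [hslice, ih, List.drop_eq_getElem_cons h, pvGroups]
    congr 1
    rw [hj, ← List.drop_drop, drop_length_takeWhile]

-- ===== VERDICT (by name: the statement is the Claim_ definition above) =====
theorem group_like_elements_spec : Claim_equal_group_like_elements := by
  intro D _
  show _ = _
  rw [a_eq_groups, group_like_elements_alt, b_eq_groups D 0, List.drop_zero]
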